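-- pv_equiv track=rewrite | github.com/Natneam/competitive-programming | a2sv camp problems contests and more/Contests/A2SV - Africa to Silicon Valley - Fall Camp 2021 Observation Contest 1/D. Red and Blue.py | solve
-- ===== SOURCE A (Python) =====
-- def solve(r, b):
--     #construct the prefix sum
--     r = [0] + r
--     b = [0] + b
--     for i in range(1, len(r)):
--         r[i] = r[i-1] + r[i]
--     for i in range(1, len(b)):
--         b[i] = b[i-1] + b[i]
--     answer = max(r) + max(b)
--     return 0 if answer <= 0 else answer
-- ===== SOURCE B (Python) =====
-- def solve(r, b):
--     # divide and conquer: go(xs) returns (total sum, best prefix sum incl. the empty prefix);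
--     # halves combine by best = max(best_left, sum_left + best_right). Both bests are >= 0,
--     # so A's final clamp to 0 is never needed and B just returns the sum of the two bests.
--     def go(xs):
--         n = len(xs)
--         if n == 0:
--             return (0, 0)
--         if n == 1:
--             x = xs[0]
--             return (x, max(0, x))
--         m = n // 2
--         sl, bl = go(xs[:m])
--         sr, br = go(xs[m:])
--         return (sl + sr, max(bl, sl + br))
--     return go(r)[1] + go(b)[1]
-- ===== Notes on version B (the rewrite author's own statement) =====
-- stated objective: alternative
-- what changed: Replaces A's sequential prefix-sum table build plus max scan with a divide-and-conquer recursion that splits each list in half and combines (sum, best-prefix) pairs, never materializing prefix sums; since both bests are nonnegative A's final clamp is dropped.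
import Mathlib
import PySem

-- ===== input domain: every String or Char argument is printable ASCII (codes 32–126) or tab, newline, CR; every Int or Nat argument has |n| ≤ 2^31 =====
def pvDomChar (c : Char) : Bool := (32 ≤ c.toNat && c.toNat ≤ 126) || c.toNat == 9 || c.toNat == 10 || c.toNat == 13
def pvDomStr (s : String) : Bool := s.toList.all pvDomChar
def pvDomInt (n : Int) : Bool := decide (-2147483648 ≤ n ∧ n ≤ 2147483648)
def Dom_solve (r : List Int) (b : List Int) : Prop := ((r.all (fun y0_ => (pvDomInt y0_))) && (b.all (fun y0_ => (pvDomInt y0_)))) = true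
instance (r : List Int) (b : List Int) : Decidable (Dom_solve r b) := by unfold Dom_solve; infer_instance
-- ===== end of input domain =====

-- B replaces A's sequential prefix-sum table + max scan with a divide-and-conquer recursion combining (sum, best-prefix) pairs per half; same return value.


-- ===== PORT A =====
-- the loop 'for i in range(1,len(r)): r[i]=r[i-1]+r[i]' over [0]+r, as a fold carrying (list built so far, previous cell)
def prefA (xs : List Int) : List Int :=
  (xs.foldl (fun st x => (st.1 ++ [st.2 + x], st.2 + x)) ([(0 : Int)], (0 : Int))).1

def solve (r : List Int) (b : List Int) : Int :=
  let r' := prefA r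
  let b' := prefA b
  -- max(r') / max(b'): lists are nonempty (they start with the prepended 0), so getD is never taken
  let answer := (PySem.List.max? r' (fun y => y)).getD 0 + (PySem.List.max? b' (fun y => y)).getD 0
  if answer ≤ 0 then 0 else answer

-- ===== PORT B =====
-- go(xs) from Source B: (total sum, best prefix sum including the empty prefix), divide and conquer.
-- xs[:m] / xs[m:] with 0 ≤ m ≤ len(xs) are exactly take/drop; xs[0] on a length-1 list is headD 0.
-- fuel = xs.length bounds the recursion depth (a totality guard only; it is never exhausted).
def goDC (fuel : Nat) (xs : List Int) : Int × Int :=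
  match fuel with
  | 0 => (0, 0)
  | fuel + 1 =>
    if xs.length = 0 then (0, 0)
    else if xs.length = 1 then
      let x := xs.headD 0
      (x, max 0 x)
    else
      let m := xs.length / 2
      let L := goDC fuel (xs.take m)
      let R := goDC fuel (xs.drop m)
      (L.1 + R.1, max L.2 (L.1 + R.2))

def solve_alt (r : List Int) (b : List Int) : Int :=
  (goDC r.length r).2 + (goDC b.length b).2

-- ===== PRECONDITION & SPEC =====
def Spec_solve (r : List Int) (b : List Int) (out : Int) : Prop := out = solve_alt r b
instance (r : List Int) (b : List Int) (out : Int) : Decidable (Spec_solve r b out) := by unfold Spec_solve; infer_instance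

-- ===== CLAIM (what is proved, stated in full; the proofs are below) =====
def Claim_equal_solve : Prop := ∀ (r : List Int) (b : List Int), Dom_solve r b → Spec_solve r b (solve r b)

-- ===== LEMMAS AND PROOFS =====

/-- best prefix sum (including the empty prefix), the reference value both ports compute -/
def M (xs : List Int) : Int := xs.foldr (fun x a => max 0 (x + a)) 0

theorem M_nonneg (xs : List Int) : 0 ≤ M xs := by
  cases xs with
  | nil => simp [M]
  | cons x t => simp [M]

theorem M_append (l r : List Int) : M (l ++ r) = max (M l) (l.sum + M r) := by
  induction l with
  | nil =>
    have := M_nonneg r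
    simp only [M, List.foldr_nil, List.nil_append, List.sum_nil, zero_add] at *
    omega
  | cons x t ih =>
    simp only [List.cons_append, M, List.foldr_cons, List.sum_cons] at *
    omega

/-- prefix sums starting just after running total `s` -/
def scanFrom : Int → List Int → List Int
  | _, [] => []
  | s, x :: t => (s + x) :: scanFrom (s + x) t

theorem prefA_foldl (xs : List Int) : ∀ (acc : List Int) (s : Int),
    (xs.foldl (fun st x => (st.1 ++ [st.2 + x], st.2 + x)) (acc, s)).1 = acc ++ scanFrom s xs := by
  induction xs with
  | nil => intro acc s; simp [scanFrom]
  | cons x t ih => intro acc s; simp [List.foldl, scanFrom, ih]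

theorem prefA_eq (xs : List Int) : prefA xs = 0 :: scanFrom 0 xs := by
  simp [prefA, prefA_foldl]

theorem scanFrom_max (xs : List Int) : ∀ (c bst : Int),
    (scanFrom c xs).foldl max (max bst c) = max bst (c + M xs) := by
  induction xs with
  | nil => intro c bst; simp [scanFrom, M]
  | cons x t ih =>
    intro c bst
    have h : max (max bst c) (c + x) = max (max bst c) (c + x) := rfl
    calc (scanFrom c (x :: t)).foldl max (max bst c)
        = (scanFrom (c + x) t).foldl max (max (max bst c) (c + x)) := by
          simp [scanFrom]
      _ = max (max bst c) ((c + x) + M t) := ih (c + x) (max bst c)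
      _ = max bst (c + M (x :: t)) := by simp only [M, List.foldr_cons]; omega

theorem maxA_eq (xs : List Int) :
    (PySem.List.max? (prefA xs) (fun y => y)).getD 0 = M xs := by
  rw [prefA_eq, PySem.List.max?_id_cons]
  have h := scanFrom_max xs 0 0
  have h2 := M_nonneg xs
  simp only [max_self, zero_add] at h
  simp only [Option.getD_some, h]
  omega

theorem goDC_eq (fuel : Nat) : ∀ (xs : List Int), xs.length ≤ fuel → goDC fuel xs = (xs.sum, M xs) := by
  induction fuel with
  | zero =>
    intro xs h
    have : xs = [] := List.length_eq_zero_iff.mp (Nat.le_zero.mp h)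
    subst this; simp [goDC, M]
  | succ fuel ih =>
    intro xs h
    rw [goDC]
    by_cases h0 : xs.length = 0
    · have : xs = [] := List.length_eq_zero_iff.mp h0
      subst this; simp [M]
    · by_cases h1 : xs.length = 1
      · obtain ⟨x, hx⟩ := List.length_eq_one_iff.mp h1
        subst hx; simp [M]
      · simp only [if_neg h0, if_neg h1]
        have hm2 : 2 ≤ xs.length := by omega
        have htake : (xs.take (xs.length / 2)).length ≤ fuel := by
          simp only [List.length_take]; omega
        have hdrop : (xs.drop (xs.length / 2)).length ≤ fuel := by
          simp only [List.length_drop]; omega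
        rw [ih _ htake, ih _ hdrop]
        have hsplit : xs = xs.take (xs.length / 2) ++ xs.drop (xs.length / 2) :=
          (List.take_append_drop _ _).symm
        conv_rhs => rw [hsplit]
        rw [List.sum_append, M_append]

-- ===== VERDICT (by name: the statement is the Claim_ definition above) =====
theorem solve_spec : Claim_equal_solve := by
  intro r b _
  show solve r b = solve_alt r b
  simp only [solve, solve_alt, maxA_eq, goDC_eq r.length r le_rfl, goDC_eq b.length b le_rfl]
  have hr := M_nonneg r
  have hb := M_nonneg b
  split_ifs with h <;> omega
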